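-- pv_equiv track=rewrite | github.com/golibabduxalilov1/jalyuzBot | services/search_service.py | find_stock_for_code
-- ===== SOURCE A (Python) =====
-- from typing import Optional, List, Dict, Tuple
--
-- def extract_numbers_only(code_str: str) -> str:
--     """Extract only numbers from code string."""
--     if not code_str:
--         return ""
--     return "".join(c for c in str(code_str) if c.isdigit())
--
-- def find_stock_for_code(norm_code: str, stock_map: Dict[str, Dict]) -> Optional[str]:
--     """
--     Find stock quantity for a given normalized code.
--
--     Tries multiple matching strategies:
--     1. Exact match
--     2. Startswith match
--     3. Endswith match
--     4. Contains match
--     5. Number-only match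
--
--     Args:
--         norm_code: Normalized product code
--         stock_map: Dictionary mapping codes to stock info
--
--     Returns:
--         Stock quantity string or None if not found
--     """
--     if not norm_code or not stock_map:
--         return None
--
--     # Strategy 1: Exact match
--     if norm_code in stock_map:
--         return stock_map[norm_code].get("quantity", "")
--
--     # Strategy 2: Startswith
--     for key, value in stock_map.items():
--         if key.startswith(norm_code) or norm_code.startswith(key):
--             return value.get("quantity", "")
--
--     # Strategy 3: Endswith
--     for key, value in stock_map.items():
--         if key.endswith(norm_code) or norm_code.endswith(key):
--             return value.get("quantity", "")
--
--     # Strategy 4: Contains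
--     for key, value in stock_map.items():
--         if norm_code in key or key in norm_code:
--             return value.get("quantity", "")
--
--     # Strategy 5: Number-only match
--     norm_numbers = extract_numbers_only(norm_code)
--     if norm_numbers:
--         for key, value in stock_map.items():
--             key_numbers = extract_numbers_only(key)
--             if key_numbers and norm_numbers == key_numbers:
--                 return value.get("quantity", "")
--
--     return None
-- ===== SOURCE B (Python) =====
-- from typing import Optional, Dict
--
-- def extract_numbers_only(code_str: str) -> str:
--     """Extract only numbers from code string."""
--     if not code_str:
--         return ""
--     return "".join(c for c in str(code_str) if c.isdigit())
--
-- def _rank(norm_code: str, norm_numbers: str, key: str):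
--     """Strategy rank of a key against norm_code, or None if it matches no strategy."""
--     if key == norm_code:
--         return 1
--     if key.startswith(norm_code) or norm_code.startswith(key):
--         return 2
--     if key.endswith(norm_code) or norm_code.endswith(key):
--         return 3
--     if norm_code in key or key in norm_code:
--         return 4
--     if norm_numbers and extract_numbers_only(key) == norm_numbers:
--         return 5
--     return None
--
-- def find_stock_for_code(norm_code: str, stock_map: Dict[str, Dict]) -> Optional[str]:
--     """Single pass: keep the earliest key of the best (smallest) strategy rank."""
--     if not norm_code:
--         return None
--     norm_numbers = extract_numbers_only(norm_code)
--     best = None  # (rank, quantity)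
--     for key, value in stock_map.items():
--         r = _rank(norm_code, norm_numbers, key)
--         if r is None:
--             continue
--         if best is None or r < best[0]:
--             best = (r, value.get("quantity", ""))
--     return best[1] if best is not None else None
-- ===== Notes on version B (the rewrite author's own statement) =====
-- stated objective: alternative
-- what changed: A runs up to five sequential scans of the map, one per matching strategy, returning from the first scan that hits; B makes a single pass that computes each key's strategy rank and keeps the earliest key with the smallest rank.
import Mathlib
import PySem

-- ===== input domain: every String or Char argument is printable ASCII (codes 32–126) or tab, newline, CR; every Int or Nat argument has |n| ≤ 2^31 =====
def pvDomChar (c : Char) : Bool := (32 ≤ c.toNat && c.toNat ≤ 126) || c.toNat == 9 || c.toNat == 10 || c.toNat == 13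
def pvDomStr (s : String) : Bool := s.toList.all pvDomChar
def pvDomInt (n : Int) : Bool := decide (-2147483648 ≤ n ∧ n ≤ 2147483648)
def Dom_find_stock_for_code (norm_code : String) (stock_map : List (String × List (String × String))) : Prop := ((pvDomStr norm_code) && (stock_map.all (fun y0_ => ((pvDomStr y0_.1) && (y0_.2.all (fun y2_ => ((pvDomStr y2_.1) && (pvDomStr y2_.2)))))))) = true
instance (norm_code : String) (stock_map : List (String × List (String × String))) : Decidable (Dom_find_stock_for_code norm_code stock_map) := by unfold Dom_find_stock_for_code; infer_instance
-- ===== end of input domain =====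

-- B replaces A's five sequential strategy scans of the map by a single pass that keeps
-- the earliest key of the smallest strategy rank (objective: alternative algorithm).

-- ===== PORT A =====
-- shared module helper: extract_numbers_only (Python str.isdigit on the ASCII domain = Char.isDigit)
def extract_numbers_only (code_str : String) : String :=
  if code_str = "" then "" else String.ofList (code_str.toList.filter Char.isDigit)

-- value.get("quantity", "") on an association-list dict: first matching key, else ""
def pyGetQuantity (value : List (String × String)) : String :=
  match value.find? (fun p => p.1 == "quantity") with
  | some p => p.2
  | none => ""

def find_stock_for_code (norm_code : String) (stock_map : List (String × List (String × String))) : Option String :=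
  if norm_code = "" ∨ stock_map = [] then none
  else
    -- Strategy 1: exact match ('norm_code in stock_map' then lookup = first pair with that key)
    match stock_map.find? (fun kv => kv.1 == norm_code) with
    | some kv => some (pyGetQuantity kv.2)
    | none =>
    -- Strategy 2: startswith
    match stock_map.find? (fun kv => PySem.Str.startswith kv.1 norm_code || PySem.Str.startswith norm_code kv.1) with
    | some kv => some (pyGetQuantity kv.2)
    | none =>
    -- Strategy 3: endswith
    match stock_map.find? (fun kv => PySem.Str.endswith kv.1 norm_code || PySem.Str.endswith norm_code kv.1) with
    | some kv => some (pyGetQuantity kv.2)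
    | none =>
    -- Strategy 4: contains
    match stock_map.find? (fun kv => PySem.Str.isIn norm_code kv.1 || PySem.Str.isIn kv.1 norm_code) with
    | some kv => some (pyGetQuantity kv.2)
    | none =>
    -- Strategy 5: number-only match
    let norm_numbers := extract_numbers_only norm_code
    if norm_numbers ≠ "" then
      match stock_map.find? (fun kv => !(extract_numbers_only kv.1 == "") && (norm_numbers == extract_numbers_only kv.1)) with
      | some kv => some (pyGetQuantity kv.2)
      | none => none
    else none

-- ===== PORT B =====
-- Source B's _rank: strategy rank of a key, or none
def rank_of (norm_code norm_numbers key : String) : Option Nat :=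
  if key == norm_code then some 1
  else if PySem.Str.startswith key norm_code || PySem.Str.startswith norm_code key then some 2
  else if PySem.Str.endswith key norm_code || PySem.Str.endswith norm_code key then some 3
  else if PySem.Str.isIn norm_code key || PySem.Str.isIn key norm_code then some 4
  else if !(norm_numbers == "") && (extract_numbers_only key == norm_numbers) then some 5
  else none

def find_stock_for_code_alt (norm_code : String) (stock_map : List (String × List (String × String))) : Option String :=
  if norm_code = "" then none
  else
    let norm_numbers := extract_numbers_only norm_code
    (stock_map.foldl (fun best kv =>
      match rank_of norm_code norm_numbers kv.1 with
      | none => best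
      | some r =>
        match best with
        | none => some (r, pyGetQuantity kv.2)
        | some b => if r < b.1 then some (r, pyGetQuantity kv.2) else some b) none).map (·.2)

-- ===== PRECONDITION & SPEC =====
def Spec_find_stock_for_code (norm_code : String) (stock_map : List (String × List (String × String))) (out : Option String) : Prop := out = find_stock_for_code_alt norm_code stock_map
instance (norm_code : String) (stock_map : List (String × List (String × String))) (out : Option String) : Decidable (Spec_find_stock_for_code norm_code stock_map out) := by unfold Spec_find_stock_for_code; infer_instance

-- ===== CLAIM (what is proved, stated in full; the proofs are below) =====
def Claim_equal_find_stock_for_code : Prop := ∀ (norm_code : String) (stock_map : List (String × List (String × String))), Dom_find_stock_for_code norm_code stock_map → Spec_find_stock_for_code norm_code stock_map (find_stock_for_code norm_code stock_map)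

-- ===== LEMMAS AND PROOFS =====

-- the strategy-j predicate on a key (j = 1..5), shared characterisation of both ports
def pvQ (nc nn : String) (j : Nat) (key : String) : Bool :=
  match j with
  | 1 => key == nc
  | 2 => PySem.Str.startswith key nc || PySem.Str.startswith nc key
  | 3 => PySem.Str.endswith key nc || PySem.Str.endswith nc key
  | 4 => PySem.Str.isIn nc key || PySem.Str.isIn key nc
  | 5 => !(nn == "") && (extract_numbers_only key == nn)
  | _ => false

-- A's five sequential scans, returning the winning rank as well
def pvChain (nc nn : String) (l : List (String × List (String × String))) : Option (Nat × String) :=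
  match l.find? (fun kv => pvQ nc nn 1 kv.1) with
  | some kv => some (1, pyGetQuantity kv.2)
  | none =>
  match l.find? (fun kv => pvQ nc nn 2 kv.1) with
  | some kv => some (2, pyGetQuantity kv.2)
  | none =>
  match l.find? (fun kv => pvQ nc nn 3 kv.1) with
  | some kv => some (3, pyGetQuantity kv.2)
  | none =>
  match l.find? (fun kv => pvQ nc nn 4 kv.1) with
  | some kv => some (4, pyGetQuantity kv.2)
  | none =>
  match l.find? (fun kv => pvQ nc nn 5 kv.1) with
  | some kv => some (5, pyGetQuantity kv.2)
  | none => none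

-- left-biased min-rank merge: the effect of B's strict-less update
def pvMerge (a b : Option (Nat × String)) : Option (Nat × String) :=
  match a, b with
  | none, b => b
  | some a, none => some a
  | some a, some b => if b.1 < a.1 then some b else some a

def pvStep (nc nn : String) (best : Option (Nat × String)) (kv : String × List (String × String)) : Option (Nat × String) :=
  match rank_of nc nn kv.1 with
  | none => best
  | some r =>
    match best with
    | none => some (r, pyGetQuantity kv.2)
    | some b => if r < b.1 then some (r, pyGetQuantity kv.2) else some b

theorem pvStep_eq (nc nn : String) (acc : Option (Nat × String)) (kv : String × List (String × String)) :
    pvStep nc nn acc kv = pvMerge acc (pvStep nc nn none kv) := by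
  unfold pvStep pvMerge
  cases rank_of nc nn kv.1 <;> cases acc <;> simp

theorem pvMerge_assoc (a b c : Option (Nat × String)) :
    pvMerge (pvMerge a b) c = pvMerge a (pvMerge b c) := by
  unfold pvMerge
  rcases a with _ | a <;> rcases b with _ | b <;> rcases c with _ | c <;>
    simp only [pvMerge] <;> split_ifs <;> simp only [pvMerge] <;> split_ifs <;>
    first | rfl | (exfalso; omega)

theorem foldl_pvStep (nc nn : String) (l : List (String × List (String × String))) (acc : Option (Nat × String)) :
    l.foldl (pvStep nc nn) acc = pvMerge acc (l.foldl (pvStep nc nn) none) := by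
  induction l generalizing acc with
  | nil => cases acc <;> rfl
  | cons x t ih =>
    simp only [List.foldl_cons]
    rw [ih (pvStep nc nn acc x), ih (pvStep nc nn none x), pvStep_eq, pvMerge_assoc]

theorem rank_of_eq (nc nn key : String) :
    rank_of nc nn key =
      if pvQ nc nn 1 key then some 1
      else if pvQ nc nn 2 key then some 2
      else if pvQ nc nn 3 key then some 3
      else if pvQ nc nn 4 key then some 4
      else if pvQ nc nn 5 key then some 5
      else none := rfl

theorem pvChain_cons (nc nn : String) (x : String × List (String × String)) (t : List (String × List (String × String))) :
    pvChain nc nn (x :: t) = pvMerge (pvStep nc nn none x) (pvChain nc nn t) := by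
  by_cases q1 : pvQ nc nn 1 x.1 = true <;> by_cases q2 : pvQ nc nn 2 x.1 = true <;>
    by_cases q3 : pvQ nc nn 3 x.1 = true <;> by_cases q4 : pvQ nc nn 4 x.1 = true <;>
    by_cases q5 : pvQ nc nn 5 x.1 = true <;>
    simp only [pvChain, List.find?_cons, pvStep, rank_of_eq, q1, q2, q3, q4, q5,
      if_true, if_false, Bool.not_eq_true] <;>
    cases hf1 : t.find? (fun kv => pvQ nc nn 1 kv.1) <;>
    cases hf2 : t.find? (fun kv => pvQ nc nn 2 kv.1) <;>
    cases hf3 : t.find? (fun kv => pvQ nc nn 3 kv.1) <;>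
    cases hf4 : t.find? (fun kv => pvQ nc nn 4 kv.1) <;>
    cases hf5 : t.find? (fun kv => pvQ nc nn 5 kv.1) <;>
    simp [hf1, hf2, hf3, hf4, hf5, pvMerge]

theorem pvChain_eq_foldl (nc nn : String) (l : List (String × List (String × String))) :
    pvChain nc nn l = l.foldl (pvStep nc nn) none := by
  induction l with
  | nil => rfl
  | cons x t ih =>
    rw [List.foldl_cons, foldl_pvStep, ← ih, pvChain_cons]

theorem A_eq_chain (nc : String) (sm : List (String × List (String × String)))
    (hnc : nc ≠ "") (hsm : sm ≠ []) :
    find_stock_for_code nc sm = (pvChain nc (extract_numbers_only nc) sm).map (·.2) := by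
  have e1 : (fun (kv : String × List (String × String)) => kv.1 == nc)
      = (fun kv => pvQ nc (extract_numbers_only nc) 1 kv.1) := rfl
  have e2 : (fun (kv : String × List (String × String)) => PySem.Str.startswith kv.1 nc || PySem.Str.startswith nc kv.1)
      = (fun kv => pvQ nc (extract_numbers_only nc) 2 kv.1) := rfl
  have e3 : (fun (kv : String × List (String × String)) => PySem.Str.endswith kv.1 nc || PySem.Str.endswith nc kv.1)
      = (fun kv => pvQ nc (extract_numbers_only nc) 3 kv.1) := rfl
  have e4 : (fun (kv : String × List (String × String)) => PySem.Str.isIn nc kv.1 || PySem.Str.isIn kv.1 nc)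
      = (fun kv => pvQ nc (extract_numbers_only nc) 4 kv.1) := rfl
  unfold find_stock_for_code pvChain
  rw [if_neg (by simp [hnc, hsm]), e1, e2, e3, e4]
  by_cases hnn : extract_numbers_only nc = ""
  · rw [hnn]
    have h5 : sm.find? (fun kv => pvQ nc "" 5 kv.1) = none :=
      List.find?_eq_none.mpr (fun kv _ => by simp [pvQ])
    rw [h5]
    cases hc1 : sm.find? (fun kv => pvQ nc "" 1 kv.1) <;>
      cases hc2 : sm.find? (fun kv => pvQ nc "" 2 kv.1) <;>
      cases hc3 : sm.find? (fun kv => pvQ nc "" 3 kv.1) <;>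
      cases hc4 : sm.find? (fun kv => pvQ nc "" 4 kv.1) <;>
      simp [hc1, hc2, hc3, hc4]
  · have e5 : (fun (kv : String × List (String × String)) =>
        !(extract_numbers_only kv.1 == "") && (extract_numbers_only nc == extract_numbers_only kv.1))
      = (fun kv => pvQ nc (extract_numbers_only nc) 5 kv.1) := by
      funext kv
      simp only [pvQ]
      by_cases he : extract_numbers_only kv.1 = extract_numbers_only nc
      · rw [he]
      · have hA : (extract_numbers_only nc == extract_numbers_only kv.1) = false :=
          beq_false_of_ne (fun h => he h.symm)
        have hB : (extract_numbers_only kv.1 == extract_numbers_only nc) = false :=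
          beq_false_of_ne he
        simp [hA, hB]
    simp only [ne_eq, hnn, not_false_eq_true, if_true, e5]
    cases hc1 : sm.find? (fun kv => pvQ nc (extract_numbers_only nc) 1 kv.1) <;>
      cases hc2 : sm.find? (fun kv => pvQ nc (extract_numbers_only nc) 2 kv.1) <;>
      cases hc3 : sm.find? (fun kv => pvQ nc (extract_numbers_only nc) 3 kv.1) <;>
      cases hc4 : sm.find? (fun kv => pvQ nc (extract_numbers_only nc) 4 kv.1) <;>
      cases hc5 : sm.find? (fun kv => pvQ nc (extract_numbers_only nc) 5 kv.1) <;>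
      simp [hc1, hc2, hc3, hc4, hc5, hnn]

theorem find_stock_for_code_spec : Claim_equal_find_stock_for_code := by
  intro nc sm _
  unfold Spec_find_stock_for_code
  by_cases hnc : nc = ""
  · subst hnc
    simp [find_stock_for_code, find_stock_for_code_alt]
  · by_cases hsm : sm = []
    · subst hsm
      simp [find_stock_for_code, find_stock_for_code_alt, hnc]
    · have halt : find_stock_for_code_alt nc sm
          = (sm.foldl (pvStep nc (extract_numbers_only nc)) none).map (·.2) := by
        unfold find_stock_for_code_alt
        rw [if_neg hnc]
        rfl
      rw [A_eq_chain nc sm hnc hsm, pvChain_eq_foldl, halt]
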